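-- pv_equiv track=rewrite | github.com/ahurka/woudc-data-registry | woudc_data_registry/report.py | _group_dict_keys
-- ===== SOURCE A (Python) =====
-- def _group_dict_keys(source):
--     """
--     Returns a modified versions of the argument, in which tuples
--     of keys with shared values map to sets of those values.
--     Each value is represented with one entire group as a key.
--
--     Values in the <source> dictionary are lists of hashable values.
--
--     :param source: A `dict` with hashable values.
--     :returns: Another `dict` with groups of keys mapping to their
--               shared values.
--     """
--
--     inverted = {}
--     collected = {}
--
--     for key, valuelist in source.items():
--         for value in valuelist:
--             if value not in inverted:
--                 inverted[value] = set()
--             inverted[value].add(key)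
--
--     for value, keylist in inverted.items():
--         standard_keylist = tuple(sorted(list(keylist)))
--
--         if standard_keylist not in collected:
--             collected[standard_keylist] = set()
--         collected[standard_keylist].add(value)
--
--     return collected
-- ===== SOURCE B (Python) =====
-- def _group_dict_keys(source):
--     """Same result as A, built declaratively: ordered-distinct values, a
--     per-value canonical key tuple computed by filtering the source, and
--     ordered-distinct tuples with their value groups gathered by filtering."""
--     values = list(dict.fromkeys(v for vs in source.values() for v in vs))
--     key_of = {v: tuple(sorted({k for k, vs in source.items() if v in vs}))
--               for v in values}
--     groups = list(dict.fromkeys(key_of[v] for v in values))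
--     return {t: {v for v in values if key_of[v] == t} for t in groups}
-- ===== Notes on version B (the rewrite author's own statement) =====
-- stated objective: alternative
-- what changed: A builds its result by two mutate-and-accumulate dict passes (invert into value->set-of-keys, then hash-accumulate sorted key tuples into groups); B is a declarative pipeline: the ordered-distinct value list, a per-value canonical key tuple computed by filtering the source, and the ordered-distinct tuples each paired with the values gathered by filtering.
import Mathlib
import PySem

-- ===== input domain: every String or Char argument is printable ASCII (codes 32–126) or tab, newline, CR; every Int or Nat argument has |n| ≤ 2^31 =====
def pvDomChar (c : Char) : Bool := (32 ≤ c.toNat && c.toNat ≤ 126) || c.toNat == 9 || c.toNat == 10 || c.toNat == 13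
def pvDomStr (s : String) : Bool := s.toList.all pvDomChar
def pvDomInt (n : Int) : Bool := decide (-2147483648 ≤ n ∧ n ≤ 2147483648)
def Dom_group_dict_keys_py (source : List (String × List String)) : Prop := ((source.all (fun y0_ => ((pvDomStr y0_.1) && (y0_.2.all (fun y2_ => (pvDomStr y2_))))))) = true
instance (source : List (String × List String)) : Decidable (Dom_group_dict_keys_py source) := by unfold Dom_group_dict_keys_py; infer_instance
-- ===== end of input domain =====

-- B replaces A's two mutate-and-accumulate dict passes by a declarative pipeline
-- (ordered-distinct values, a per-value canonical key tuple computed by filtering the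
-- source, ordered-distinct tuples with their groups gathered by filtering): objective
-- 'alternative' — genuinely different structure, similar cost.

-- ===== PORT A =====
def group_dict_keys_py (source : List (String × List String)) : List (List String × List String) :=
  let inverted : PySem.Dict String (PySem.Set String) :=
    source.foldl (fun d kv =>
      kv.2.foldl (fun d v =>
        let d' := if d.contains v then d else d.insert v PySem.Set.empty
        d'.modify v PySem.Set.empty (fun s => PySem.Set.add s kv.1)) d) PySem.Dict.empty
  let collected : PySem.Dict (List String) (PySem.Set String) :=
    inverted.items.foldl (fun c p =>
      let t := PySem.List.sorted p.2 (fun x => x)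
      let c' := if c.contains t then c else c.insert t PySem.Set.empty
      c'.modify t PySem.Set.empty (fun s => PySem.Set.add s p.1)) PySem.Dict.empty
  collected.items

-- ===== PORT B =====
def pvKeysOf (source : List (String × List String)) (v : String) : List String :=
  PySem.List.sorted
    (PySem.Set.ofList ((source.filter (fun p => p.2.contains v)).map (fun p => p.1)))
    (fun x => x)

def group_dict_keys_py_alt (source : List (String × List String)) : List (List String × List String) :=
  let values : List String := PySem.List.dedup (source.flatMap (fun p => p.2))
  let groups : List (List String) := PySem.List.dedup (values.map (pvKeysOf source))
  groups.map (fun t => (t, PySem.Set.ofList (values.filter (fun v => pvKeysOf source v == t))))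

-- ===== PRECONDITION & SPEC =====
def Spec_group_dict_keys_py (source : List (String × List String)) (out : List (List String × List String)) : Prop := out = group_dict_keys_py_alt source
instance (source : List (String × List String)) (out : List (List String × List String)) : Decidable (Spec_group_dict_keys_py source out) := by unfold Spec_group_dict_keys_py; infer_instance

-- ===== CLAIM (what is proved, stated in full; the proofs are below) =====
def Claim_equal_group_dict_keys_py : Prop := ∀ (source : List (String × List String)), Dom_group_dict_keys_py source → Spec_group_dict_keys_py source (group_dict_keys_py source)

-- ===== LEMMAS AND PROOFS =====

-- the insert-if-absent that A performs before `inverted[value].add(key)` is absorbed by `modify`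
theorem pv_if_insert_modify {κ ν : Type} [BEq κ] [LawfulBEq κ]
    (d : PySem.Dict κ ν) (t : κ) (d0 : ν) (f : ν → ν) :
    (if d.contains t then d else d.insert t d0).modify t d0 f = d.modify t d0 f := by
  by_cases h : d.contains t = true
  · simp [h]
  · simp only [Bool.not_eq_true] at h
    simp only [h, Bool.false_eq_true, if_false]
    unfold PySem.Dict.modify
    rw [PySem.Dict.getD_insert_self, PySem.Dict.getD_of_not_contains d d0 h]
    apply PySem.Dict.ext
    rw [PySem.Dict.items_insert_of_contains _ _ (PySem.Dict.contains_insert_self d t d0),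
        PySem.Dict.items_insert_of_not_contains d d0 h,
        PySem.Dict.items_insert_of_not_contains d (f d0) h, List.map_append]
    have hmap : d.items.map (fun p => if (p.1 == t) = true then (t, f d0) else p) = d.items := by
      conv_rhs => rw [← List.map_id d.items]
      apply List.map_congr_left
      intro p hp
      have hne : (p.1 == t) = false := by
        rw [beq_eq_false_iff_ne]
        intro hEq
        have hm : t ∈ d.keys := by
          simp only [PySem.Dict.keys]
          exact hEq ▸ List.mem_map_of_mem hp
        rw [(PySem.Dict.contains_iff_mem_keys d t).2 hm] at h
        exact Bool.true_eq_false.mp h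
      simp [hne]
    simp [hmap]

-- a dict-accumulate grouping loop, characterised: ordered-distinct keys, groups by filtering
theorem pv_items_groupFold {β κ ν : Type} [BEq κ] [LawfulBEq κ] [BEq ν]
    (l : List β) (key : β → κ) (val : β → ν) :
    (l.foldl (fun d x => d.modify (key x) PySem.Set.empty (fun s => PySem.Set.add s (val x)))
        (PySem.Dict.empty : PySem.Dict κ (PySem.Set ν))).items
      = (PySem.Set.ofList (l.map key)).map
          (fun t => (t, PySem.Set.ofList ((l.filter (fun x => key x == t)).map val))) := by
  induction l using List.reverseRecOn with
  | nil => rfl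
  | append_singleton l x ih =>
    rw [List.foldl_append, List.foldl_cons, List.foldl_nil,
        List.map_append, List.map_cons, List.map_nil, PySem.Set.ofList_append_singleton]
    have hkeys : (l.foldl (fun d x => d.modify (key x) PySem.Set.empty fun s => PySem.Set.add s (val x))
        (PySem.Dict.empty : PySem.Dict κ (PySem.Set ν))).keys = PySem.Set.ofList (l.map key) := by
      rw [PySem.Dict.keys_foldl_modify_key l key PySem.Set.empty
          (fun _ x s => PySem.Set.add s (val x)) PySem.Dict.empty,
          PySem.Dict.keys_empty, PySem.Set.update_nil_left]
    have hnodup : (l.foldl (fun d x => d.modify (key x) PySem.Set.empty fun s => PySem.Set.add s (val x))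
        (PySem.Dict.empty : PySem.Dict κ (PySem.Set ν))).keys.Nodup := by
      rw [hkeys]; exact PySem.Set.nodup_ofList _
    set D := l.foldl (fun d x => d.modify (key x) PySem.Set.empty fun s => PySem.Set.add s (val x))
        (PySem.Dict.empty : PySem.Dict κ (PySem.Set ν)) with hDdef
    by_cases hc : D.contains (key x) = true
    · have hmem : key x ∈ PySem.Set.ofList (l.map key) := by
        rw [← hkeys]; exact (PySem.Dict.contains_iff_mem_keys _ _).1 hc
      rw [PySem.Set.add_of_mem hmem]
      have hpair : (key x, PySem.Set.ofList ((l.filter (fun y => key y == key x)).map val)) ∈ D.items := by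
        rw [ih]
        exact List.mem_map_of_mem hmem
      have hgetD : D.getD (key x) PySem.Set.empty
          = PySem.Set.ofList ((l.filter (fun y => key y == key x)).map val) :=
        PySem.Dict.getD_of_mem_items _ hpair hnodup PySem.Set.empty
      unfold PySem.Dict.modify
      rw [PySem.Dict.items_insert_of_contains _ _ hc, ih, hgetD, List.map_map]
      apply List.map_congr_left
      intro t ht
      by_cases hteq : t = key x
      · subst hteq
        simp only [Function.comp_apply, beq_self_eq_true, if_true]
        rw [List.filter_append, List.map_append,
            List.filter_cons, List.filter_nil]
        simp only [beq_self_eq_true, if_true]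
        rw [List.map_cons, List.map_nil, PySem.Set.ofList_append_singleton]
      · have hbne : (t == key x) = false := by simp [hteq]
        simp only [Function.comp_apply, hbne, Bool.false_eq_true, if_false]
        rw [List.filter_append, List.filter_cons, List.filter_nil]
        have hxne : (key x == t) = false := by
          rw [beq_eq_false_iff_ne]
          exact fun hEq => hteq hEq.symm
        simp only [hxne, Bool.false_eq_true, if_false, List.append_nil]
    · have hcf : D.contains (key x) = false := by simpa using hc
      have hnmem : key x ∉ PySem.Set.ofList (l.map key) := by
        intro hm
        rw [← hkeys] at hm
        rw [(PySem.Dict.contains_iff_mem_keys _ _).2 hm] at hcf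
        exact Bool.true_eq_false.mp hcf
      rw [PySem.Set.add_of_not_mem hnmem]
      unfold PySem.Dict.modify
      rw [PySem.Dict.items_insert_of_not_contains D _ hcf,
          PySem.Dict.getD_of_not_contains D _ hcf, ih, List.map_append]
      congr 1
      · apply List.map_congr_left
        intro t ht
        have htne : (key x == t) = false := by
          rw [beq_eq_false_iff_ne]
          intro hEq
          exact hnmem ((PySem.Set.mem_ofList _ _).2 (hEq ▸ (PySem.Set.mem_ofList _ _).1 ht))
        rw [List.filter_append, List.filter_cons, List.filter_nil]
        simp only [htne, Bool.false_eq_true, if_false, List.append_nil]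
      · have h0 : (l.filter (fun y => key y == key x)) = [] := by
          rw [List.filter_eq_nil_iff]
          intro y hy hbe
          exact hnmem ((PySem.Set.mem_ofList _ _).2 ((eq_of_beq hbe) ▸ List.mem_map_of_mem hy))
        rw [List.map_cons, List.map_nil, List.filter_append, h0, List.nil_append,
            List.filter_cons, List.filter_nil]
        simp only [beq_self_eq_true, if_true, List.map_cons, List.map_nil]
        rfl

-- phase 1 of A written over the flattened (value, key) pair list
theorem pv_phase1_flat (source : List (String × List String)) :
    (source.foldl (fun d kv =>
        kv.2.foldl (fun d v => d.modify v PySem.Set.empty (fun s => PySem.Set.add s kv.1)) d)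
      (PySem.Dict.empty : PySem.Dict String (PySem.Set String)))
    = ((source.flatMap (fun kv => kv.2.map (fun v => (v, kv.1)))).foldl
        (fun d p => d.modify p.1 PySem.Set.empty (fun s => PySem.Set.add s p.2))
        PySem.Dict.empty) := by
  rw [List.foldl_flatMap]
  congr 1
  funext d kv
  rw [List.foldl_map]

-- A's sorted key-set of a value equals B's pvKeysOf
theorem pv_keys_eq (source : List (String × List String)) (v : String) :
    PySem.List.sorted
      (PySem.Set.ofList
        (((source.flatMap (fun kv => kv.2.map (fun w => (w, kv.1)))).filter
            (fun p => p.1 == v)).map (fun p => p.2)))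
      (fun x => x)
    = pvKeysOf source v := by
  unfold pvKeysOf
  apply PySem.List.sorted_eq_sorted_of_perm _ _ _ (fun a b h => h)
  rw [List.perm_ext_iff_of_nodup (PySem.Set.nodup_ofList _) (PySem.Set.nodup_ofList _)]
  intro k
  rw [PySem.Set.mem_ofList, PySem.Set.mem_ofList]
  simp only [List.mem_map, List.mem_filter, List.mem_flatMap, beq_iff_eq, List.contains_iff_mem]
  constructor
  · rintro ⟨⟨w, k'⟩, ⟨⟨kv, hkv, a, ha, haeq⟩, hv⟩, hk⟩
    cases haeq
    exact ⟨kv, ⟨hkv, by simp_all⟩, by simp_all⟩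
  · rintro ⟨kv, ⟨hkv, hvkv⟩, hk⟩
    exact ⟨(v, kv.1), ⟨⟨kv, hkv, v, hvkv, rfl⟩, rfl⟩, hk⟩

-- phase 2 of A over items of the shape produced by phase 1
theorem pv_phase2 (values : List String) (W : String → PySem.Set String) :
    ((values.map (fun v => (v, W v))).foldl
        (fun c p => c.modify (PySem.List.sorted p.2 (fun x => x)) PySem.Set.empty
          (fun s => PySem.Set.add s p.1)) PySem.Dict.empty).items
      = (PySem.Set.ofList (values.map (fun v => PySem.List.sorted (W v) (fun x => x)))).map
          (fun t => (t, PySem.Set.ofList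
              (values.filter (fun v => PySem.List.sorted (W v) (fun x => x) == t)))) := by
  rw [pv_items_groupFold _ (fun p : String × PySem.Set String => PySem.List.sorted p.2 (fun x => x))
      (fun p => p.1), List.map_map]
  have h1 : ((fun p : String × PySem.Set String => PySem.List.sorted p.2 (fun x => x)) ∘
      (fun v => (v, W v))) = fun v => PySem.List.sorted (W v) (fun x => x) := rfl
  rw [h1]
  apply List.map_congr_left
  intro t _
  congr 1
  rw [List.filter_map, List.map_map]
  have h2 : ((fun p : String × PySem.Set String => p.1) ∘ (fun v => (v, W v))) = fun v => v := rfl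
  have h3 : ((fun p : String × PySem.Set String => PySem.List.sorted p.2 (fun x => x) == t) ∘
      (fun v => (v, W v))) = fun v => PySem.List.sorted (W v) (fun x => x) == t := rfl
  rw [h2, h3, List.map_id']

-- the flattened pair list projects to the flat value list
theorem pv_fst_flat (source : List (String × List String)) :
    (source.flatMap (fun kv => kv.2.map (fun v => (v, kv.1)))).map (fun p => p.1)
      = source.flatMap (fun p => p.2) := by
  rw [List.map_flatMap]
  simp [List.map_map, Function.comp_def]

-- ===== VERDICT (by name: the statement is the Claim_ definition above) =====
theorem group_dict_keys_py_spec : Claim_equal_group_dict_keys_py := by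
  intro source _
  unfold Spec_group_dict_keys_py group_dict_keys_py group_dict_keys_py_alt
  simp only [pv_if_insert_modify]
  rw [pv_phase1_flat,
      pv_items_groupFold (source.flatMap (fun kv => kv.2.map (fun v => (v, kv.1))))
        (fun p => p.1) (fun p => p.2),
      pv_phase2, PySem.List.dedup_eq_ofList, PySem.List.dedup_eq_ofList]
  simp only [pv_keys_eq, pv_fst_flat]
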